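-- pv_equiv track=rewrite | github.com/vk93102/Automated-Scrapping-for-Real-estate-leads-within-24-hours | conino/extractor.py | _normalize_document_types
-- ===== SOURCE A (Python) =====
-- DEFAULT_DOCUMENT_TYPES = [
--     "LIS PENDENS",
--     "LIS PENDENS RELEASE",
--     "TRUSTEES DEED UPON SALE",
--     "SHERIFFS DEED",
--     "NOTICE OF TRUSTEES SALE",
--     "TREASURERS DEED",
--     "AMENDED STATE LIEN",
--     "STATE LIEN",
--     "STATE TAX LIEN",
--     "RELEASE STATE TAX LIEN",
-- ]
--
-- DOCUMENT_TYPE_ALIASES = {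
--     "TRUSTEES DEED": "TRUSTEES DEED UPON SALE",
--     "NOTICE OF TRUSTEE SALE": "NOTICE OF TRUSTEES SALE",
-- }
--
-- def _normalize_document_types(document_types: list[str] | None) -> list[str]:
--     if not document_types:
--         return list(DEFAULT_DOCUMENT_TYPES)
--     requested = [DOCUMENT_TYPE_ALIASES.get(item.strip().upper(), item.strip()) for item in document_types if item.strip()]
--     invalid = [item for item in requested if item.upper() not in {value.upper() for value in DEFAULT_DOCUMENT_TYPES}]
--     if invalid:
--         raise ValueError(f"Unsupported document types: {', '.join(invalid)}")
--     allowed_lookup = {value.upper(): value for value in DEFAULT_DOCUMENT_TYPES}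
--     return [allowed_lookup[item.upper()] for item in requested]
-- ===== SOURCE B (Python) =====
-- DEFAULT_DOCUMENT_TYPES = [
--     "LIS PENDENS",
--     "LIS PENDENS RELEASE",
--     "TRUSTEES DEED UPON SALE",
--     "SHERIFFS DEED",
--     "NOTICE OF TRUSTEES SALE",
--     "TREASURERS DEED",
--     "AMENDED STATE LIEN",
--     "STATE LIEN",
--     "STATE TAX LIEN",
--     "RELEASE STATE TAX LIEN",
-- ]
--
-- DOCUMENT_TYPE_ALIASES = {
--     "TRUSTEES DEED": "TRUSTEES DEED UPON SALE",
--     "NOTICE OF TRUSTEE SALE": "NOTICE OF TRUSTEES SALE",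
-- }
--
-- _CANONICAL = {value.upper(): value for value in DEFAULT_DOCUMENT_TYPES}
-- _LOOKUP = dict(_CANONICAL)
-- for _k, _v in DOCUMENT_TYPE_ALIASES.items():
--     _LOOKUP[_k] = _CANONICAL[_v.upper()]
--
-- def _normalize_document_types(document_types):
--     if not document_types:
--         return list(DEFAULT_DOCUMENT_TYPES)
--     result = []
--     invalid = []
--     for item in document_types:
--         stripped = item.strip()
--         if not stripped:
--             continue
--         canonical = _LOOKUP.get(stripped.upper())
--         if canonical is not None:
--             result.append(canonical)
--         else:
--             invalid.append(stripped)
--     if invalid: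
--         raise ValueError(f"Unsupported document types: {', '.join(invalid)}")
--     return result
-- ===== Notes on version B (the rewrite author's own statement) =====
-- stated objective: faster
-- what changed: B precomputes one combined uppercase->canonical lookup table (defaults plus resolved aliases) at module level and makes a single pass over the input, collecting results and invalid entries together, instead of A's three list comprehensions that rebuild the alias lookup, the allowed-upper set and the allowed dict on every call.
import Mathlib
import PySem

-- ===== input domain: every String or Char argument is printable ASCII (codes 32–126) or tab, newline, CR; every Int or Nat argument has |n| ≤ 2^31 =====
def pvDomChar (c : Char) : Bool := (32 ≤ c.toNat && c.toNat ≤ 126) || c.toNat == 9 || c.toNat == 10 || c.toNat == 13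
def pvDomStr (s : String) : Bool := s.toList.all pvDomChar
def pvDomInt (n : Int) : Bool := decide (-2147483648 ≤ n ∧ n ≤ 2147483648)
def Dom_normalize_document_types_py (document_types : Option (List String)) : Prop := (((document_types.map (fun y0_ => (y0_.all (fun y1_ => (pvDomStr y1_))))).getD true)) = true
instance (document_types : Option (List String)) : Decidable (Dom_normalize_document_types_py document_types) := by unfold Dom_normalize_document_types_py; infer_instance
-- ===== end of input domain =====

-- B replaces A's three comprehensions (which rebuild the alias lookup, allowed set and allowed dict
-- per call) by one precomputed combined uppercase→canonical table and a single accumulating pass.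
-- Both Pythons raise ValueError on unsupported document types: those inputs are outside Pre_.

-- shared module-level constants of the Python module
def pvDefaults : List String :=
  ["LIS PENDENS", "LIS PENDENS RELEASE", "TRUSTEES DEED UPON SALE", "SHERIFFS DEED",
   "NOTICE OF TRUSTEES SALE", "TREASURERS DEED", "AMENDED STATE LIEN", "STATE LIEN",
   "STATE TAX LIEN", "RELEASE STATE TAX LIEN"]

def pvAliases : PySem.Dict String String :=
  PySem.Dict.ofList [("TRUSTEES DEED", "TRUSTEES DEED UPON SALE"),
                     ("NOTICE OF TRUSTEE SALE", "NOTICE OF TRUSTEES SALE")]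

-- ===== PORT A =====
-- {value.upper() for value in DEFAULT_DOCUMENT_TYPES}
def pvAllowedSet : PySem.Set String := PySem.Set.ofList (pvDefaults.map (fun v => PySem.Str.upper v))
-- {value.upper(): value for value in DEFAULT_DOCUMENT_TYPES}
def pvAllowed : PySem.Dict String String :=
  pvDefaults.foldl (fun d v => d.insert (PySem.Str.upper v) v) PySem.Dict.empty

def normalize_document_types_py (document_types : Option (List String)) : List String :=
  match document_types with
  | none => pvDefaults            -- 'if not document_types'
  | some l =>
    if l = [] then pvDefaults
    else
      let requested := (l.filter (fun item => !(PySem.Str.strip item == ""))).map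
        (fun item => pvAliases.getD (PySem.Str.upper (PySem.Str.strip item)) (PySem.Str.strip item))
      let invalid := requested.filter (fun item => !(pvAllowedSet.contains (PySem.Str.upper item)))
      if invalid = [] then
        requested.map (fun item => pvAllowed.getD (PySem.Str.upper item) "")
      else []                     -- Python raises ValueError here; excluded by Pre_

-- ===== PORT B =====
-- _CANONICAL = {value.upper(): value for value in DEFAULT_DOCUMENT_TYPES}
def pvCanonical : PySem.Dict String String :=
  pvDefaults.foldl (fun d v => d.insert (PySem.Str.upper v) v) PySem.Dict.empty
-- _LOOKUP = _CANONICAL plus each alias key pointing at the canonical value of its target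
def pvLookup : PySem.Dict String String :=
  pvAliases.items.foldl (fun d kv => d.insert kv.1 (pvCanonical.getD (PySem.Str.upper kv.2) "")) pvCanonical

-- loop body of B's single pass: acc = (result, invalid)
def pvStep (acc : List String × List String) (item : String) : List String × List String :=
  let stripped := PySem.Str.strip item
  if stripped = "" then acc
  else
    match pvLookup.get? (PySem.Str.upper stripped) with
    | some v => (acc.1 ++ [v], acc.2)
    | none => (acc.1, acc.2 ++ [stripped])

def normalize_document_types_py_alt (document_types : Option (List String)) : List String :=
  match document_types with
  | none => pvDefaults
  | some l =>
    if l = [] then pvDefaults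
    else
      let r := l.foldl pvStep ([], [])
      if r.2 = [] then r.1 else []   -- Python raises ValueError here; excluded by Pre_

-- ===== PRECONDITION & SPEC =====
-- the uppercase names both programs accept: the default document types and the two alias keys
def pvValidKeys : List String :=
  ["LIS PENDENS", "LIS PENDENS RELEASE", "TRUSTEES DEED UPON SALE", "SHERIFFS DEED",
   "NOTICE OF TRUSTEES SALE", "TREASURERS DEED", "AMENDED STATE LIEN", "STATE LIEN",
   "STATE TAX LIEN", "RELEASE STATE TAX LIEN", "TRUSTEES DEED", "NOTICE OF TRUSTEE SALE"]

-- excludes exactly the inputs on which the Python A raises ValueError (an unsupported document type)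
def Pre_normalize_document_types_py (document_types : Option (List String)) : Prop :=
  ∀ item ∈ document_types.getD [],
    PySem.Str.strip item = "" ∨ PySem.Str.upper (PySem.Str.strip item) ∈ pvValidKeys
instance (document_types : Option (List String)) : Decidable (Pre_normalize_document_types_py document_types) := by
  unfold Pre_normalize_document_types_py; infer_instance

def pvWitness_normalize_document_types_py : Option (List String) :=
  some ["  lis pendens ", "trustees deed", ""]

def Spec_normalize_document_types_py (document_types : Option (List String)) (out : List String) : Prop := out = normalize_document_types_py_alt document_types
instance (document_types : Option (List String)) (out : List String) : Decidable (Spec_normalize_document_types_py document_types out) := by unfold Spec_normalize_document_types_py; infer_instance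

-- ===== CLAIM (what is proved, stated in full; the proofs are below) =====
def Claim_equal_normalize_document_types_py : Prop := ∀ (document_types : Option (List String)), Dom_normalize_document_types_py document_types → Pre_normalize_document_types_py document_types → Spec_normalize_document_types_py document_types (normalize_document_types_py document_types)

-- ===== LEMMAS AND PROOFS =====

-- the value both programs emit for an accepted, non-blank item
def pvOut (item : String) : String :=
  pvAllowed.getD (PySem.Str.upper (pvAliases.getD (PySem.Str.upper (PySem.Str.strip item)) (PySem.Str.strip item))) ""

theorem pvCore (s : String) (h : PySem.Str.upper s ∈ pvValidKeys) :
    pvLookup.get? (PySem.Str.upper s)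
        = some (pvAllowed.getD (PySem.Str.upper (pvAliases.getD (PySem.Str.upper s) s)) "")
      ∧ pvAllowedSet.contains (PySem.Str.upper (pvAliases.getD (PySem.Str.upper s) s)) = true := by
  simp only [pvValidKeys, List.mem_cons, List.not_mem_nil, or_false] at h
  rcases h with h|h|h|h|h|h|h|h|h|h|h|h
  all_goals first
    | (have hna : pvAliases.contains (PySem.Str.upper s) = false := by rw [h]; decide
       rw [PySem.Dict.getD_of_not_contains pvAliases _ hna, h]
       exact ⟨by decide, by decide⟩)
    | (have hg : pvAliases.get? (PySem.Str.upper s) = some "TRUSTEES DEED UPON SALE" := by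
         rw [h]; decide
       rw [PySem.Dict.getD_of_get?_eq_some pvAliases _ hg, h]
       exact ⟨by decide, by decide⟩)
    | (have hg : pvAliases.get? (PySem.Str.upper s) = some "NOTICE OF TRUSTEES SALE" := by
         rw [h]; decide
       rw [PySem.Dict.getD_of_get?_eq_some pvAliases _ hg, h]
       exact ⟨by decide, by decide⟩)

set_option maxHeartbeats 1600000 in
theorem pvA_char (l : List String) (hl : ¬ l = [])
    (hp : ∀ item ∈ l, PySem.Str.strip item = "" ∨ PySem.Str.upper (PySem.Str.strip item) ∈ pvValidKeys) :
    normalize_document_types_py (some l)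
      = (l.filter (fun item => !(PySem.Str.strip item == ""))).map pvOut := by
  unfold normalize_document_types_py
  simp only [if_neg hl]
  have hinv : ((l.filter (fun item => !(PySem.Str.strip item == ""))).map
      (fun item => pvAliases.getD (PySem.Str.upper (PySem.Str.strip item)) (PySem.Str.strip item))).filter
        (fun item => !(pvAllowedSet.contains (PySem.Str.upper item))) = [] := by
    rw [List.filter_eq_nil_iff]
    intro x hx
    rcases List.mem_map.mp hx with ⟨item, hmem, hxe⟩
    have hitem := List.mem_filter.mp hmem
    have hval : PySem.Str.upper (PySem.Str.strip item) ∈ pvValidKeys := by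
      rcases hp item hitem.1 with hs | hv
      · exact absurd hitem.2 (by simp [hs])
      · exact hv
    subst hxe
    rw [(pvCore (PySem.Str.strip item) hval).2]
    simp
  rw [if_pos hinv]
  simp only [List.map_map, Function.comp_def]
  unfold pvOut
  rfl

set_option maxHeartbeats 1600000 in
theorem pvB_fold (l : List String)
    (hp : ∀ item ∈ l, PySem.Str.strip item = "" ∨ PySem.Str.upper (PySem.Str.strip item) ∈ pvValidKeys) :
    ∀ r i : List String, l.foldl pvStep (r, i)
      = (r ++ (l.filter (fun item => !(PySem.Str.strip item == ""))).map pvOut, i) := by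
  induction l with
  | nil => intro r i; simp
  | cons a t ih =>
    intro r i
    have hpt : ∀ item ∈ t, PySem.Str.strip item = "" ∨ PySem.Str.upper (PySem.Str.strip item) ∈ pvValidKeys :=
      fun item hm => hp item (List.mem_cons_of_mem a hm)
    by_cases hs : PySem.Str.strip a = ""
    · have hstep : pvStep (r, i) a = (r, i) := by
        unfold pvStep
        rw [if_pos hs]
      have hf : (!(PySem.Str.strip a == "")) = false := by simp [hs]
      simp only [List.foldl_cons, hstep, List.filter_cons, hf]
      exact ih hpt r i
    · have hval : PySem.Str.upper (PySem.Str.strip a) ∈ pvValidKeys := by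
        rcases hp a List.mem_cons_self with h | h
        · exact absurd h hs
        · exact h
      have hstep : pvStep (r, i) a = (r ++ [pvOut a], i) := by
        unfold pvStep
        rw [if_neg hs, (pvCore (PySem.Str.strip a) hval).1]
        rw [pvOut]
      have hf : (!(PySem.Str.strip a == "")) = true := by simp [hs]
      simp only [List.foldl_cons, hstep, List.filter_cons, hf]
      rw [ih hpt (r ++ [pvOut a]) i]
      simp only [if_true, List.map_cons, List.append_assoc, List.cons_append, List.nil_append]

-- ===== VERDICT (by name: the statement is the Claim_ definition above) =====
theorem normalize_document_types_py_spec : Claim_equal_normalize_document_types_py := by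
  intro dt _ hpre
  unfold Spec_normalize_document_types_py
  match dt with
  | none => rfl
  | some l =>
    by_cases hl : l = []
    · subst hl; rfl
    · have hp : ∀ item ∈ l, PySem.Str.strip item = "" ∨ PySem.Str.upper (PySem.Str.strip item) ∈ pvValidKeys := by
        simpa [Pre_normalize_document_types_py] using hpre
      rw [pvA_char l hl hp]
      unfold normalize_document_types_py_alt
      simp only [if_neg hl]
      rw [pvB_fold l hp [] []]
      simp
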